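-- pv_equiv track=rewrite | github.com/aa-mill/blog | format.py | escape_math_symbols
-- ===== SOURCE A (Python) =====
-- def escape_math_symbols(text):
--     """
--     Escape asterisks and pipes that appear within math environments ($ $ or $$ $$)
--     """
--     result = ''
--     in_math = False
--     in_display_math = False
--     i = 0
--     while i < len(text):
--         if i < len(text) - 1 and text[i:i+2] == '$$':
--             # toggle display math mode
--             in_display_math = not in_display_math
--             result += text[i:i+2]
--             i += 2
--         elif text[i] == '$' and not in_display_math:
--             # toggle inline math mode
--             in_math = not in_math
--             result += text[i]
--             i += 1
--         elif (in_math or in_display_math) and text[i] in '*|':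
--             # escape asterisk or pipe in math mode
--             result += '\\' + text[i]
--             i += 1
--         else:
--             result += text[i]
--             i += 1
--     return result
-- ===== SOURCE B (Python) =====
-- def escape_math_symbols(text):
--     """
--     Escape asterisks and pipes that appear within math environments ($ $ or $$ $$)
--     """
--     parts = text.split('$')
--     out = []
--     in_math = False
--     in_display_math = False
--     j = 0
--     n = len(parts)
--     while j < n:
--         chunk = parts[j]
--         if in_math or in_display_math:
--             out.append(chunk.replace('*', '\\*').replace('|', '\\|'))
--         else:
--             out.append(chunk)
--         if j + 1 < n and parts[j + 1] == '' and j + 2 < n: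
--             # two adjacent '$' separators form a '$$' delimiter
--             in_display_math = not in_display_math
--             out.append('$$')
--             j += 2
--         elif j + 1 < n:
--             if not in_display_math:
--                 in_math = not in_math
--             out.append('$')
--             j += 1
--         else:
--             j += 1
--     return ''.join(out)
-- ===== Notes on version B (the rewrite author's own statement) =====
-- stated objective: faster
-- what changed: Replaces A's character-by-character scan with per-character string appends by splitting the text once on the dollar delimiter, walking the split pieces while toggling the math flags at the delimiters (two adjacent separators form a display-math delimiter), escaping whole chunks with str.replace, and joining at the end.
import Mathlib
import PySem

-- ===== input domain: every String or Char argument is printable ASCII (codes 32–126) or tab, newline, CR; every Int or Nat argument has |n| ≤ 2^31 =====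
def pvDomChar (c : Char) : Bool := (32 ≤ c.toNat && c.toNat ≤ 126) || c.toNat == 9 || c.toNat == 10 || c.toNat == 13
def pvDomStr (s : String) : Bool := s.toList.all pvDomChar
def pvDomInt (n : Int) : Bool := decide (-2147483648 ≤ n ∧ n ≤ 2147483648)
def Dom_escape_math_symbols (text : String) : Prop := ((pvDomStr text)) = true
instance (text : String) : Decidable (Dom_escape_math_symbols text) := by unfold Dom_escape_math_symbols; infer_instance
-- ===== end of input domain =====

-- B: instead of A's char-by-char scan with per-character appends, split the text once on the dollar delimiter,
-- walk the pieces toggling the math flags at the delimiters, and escape whole chunks with replace (faster by a constant factor).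

-- ===== PORT A =====
-- A's while loop over index i, scanning '$$' first, then '$', then escapable chars; result built left to right.
def pvALoop : List Char → Bool → Bool → List Char
  | [], _, _ => []
  | '$' :: '$' :: rest, m, d => '$' :: '$' :: pvALoop rest m (!d)
  | '$' :: rest, m, d =>
      if d then
        -- '$' with in_display_math set falls through to the plain-append branch
        '$' :: pvALoop rest m d
      else
        '$' :: pvALoop rest (!m) d
  | c :: rest, m, d =>
      if (m || d) && (c == '*' || c == '|') then '\\' :: c :: pvALoop rest m d
      else c :: pvALoop rest m d

def escape_math_symbols (text : String) : String :=
  String.ofList (pvALoop text.toList false false)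

-- ===== PORT B =====
-- chunk.replace('*','\\*').replace('|','\\|') when a math flag is on, else the chunk unchanged
def pvBChunk (m d : Bool) (chunk : List Char) : List Char :=
  if m || d then
    PySem.Chars.replace (PySem.Chars.replace chunk ['*'] ['\\', '*']) ['|'] ['\\', '|']
  else chunk

-- the while loop over j through parts: two adjacent '$' separators (empty interior part,
-- with a further part after) form a '$$' delimiter, otherwise a single '$'
def pvBLoop : List (List Char) → Bool → Bool → List Char
  | [], _, _ => []
  | [p], m, d => pvBChunk m d p
  | p :: [] :: r :: rest, m, d =>
      pvBChunk m d p ++ ['$', '$'] ++ pvBLoop (r :: rest) m (!d)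
  | p :: q :: rest, m, d =>
      pvBChunk m d p ++ ['$'] ++ pvBLoop (q :: rest) (if d then m else !m) d

def escape_math_symbols_alt (text : String) : String :=
  String.ofList (pvBLoop (PySem.Chars.splitOn text.toList ['$']) false false)

-- ===== PRECONDITION & SPEC =====
def Spec_escape_math_symbols (text : String) (out : String) : Prop := out = escape_math_symbols_alt text
instance (text : String) (out : String) : Decidable (Spec_escape_math_symbols text out) := by unfold Spec_escape_math_symbols; infer_instance

-- ===== CLAIM (what is proved, stated in full; the proofs are below) =====
def Claim_equal_escape_math_symbols : Prop := ∀ (text : String), Dom_escape_math_symbols text → Spec_escape_math_symbols text (escape_math_symbols text)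

-- ===== LEMMAS AND PROOFS =====

-- structural characterisation of split on '$'
def pvConsHead (p : List Char) : List (List Char) → List (List Char)
  | [] => [p]
  | h :: t => (p ++ h) :: t

def pvSplit : List Char → List (List Char)
  | [] => [[]]
  | c :: rest => if c = '$' then [] :: pvSplit rest else pvConsHead [c] (pvSplit rest)

theorem pvSplit_ne_nil (l : List Char) : pvSplit l ≠ [] := by
  induction l with
  | nil => simp [pvSplit]
  | cons c rest ih =>
    simp only [pvSplit]
    split
    · simp
    · cases pvSplit rest <;> simp [pvConsHead]

theorem pvConsHead_assoc (p q : List Char) (xs : List (List Char)) :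
    pvConsHead p (pvConsHead q xs) = pvConsHead (p ++ q) xs := by
  cases xs <;> simp [pvConsHead]

theorem pvSplitOn_go_eq (fuel : Nat) (l cur : List Char) (acc : List (List Char))
    (h : l.length ≤ fuel) :
    PySem.Chars.splitOn.go ['$'] fuel l cur acc = acc.reverse ++ pvConsHead cur.reverse (pvSplit l) := by
  induction fuel generalizing l cur acc with
  | zero =>
      have : l = [] := by cases l <;> simp_all
      subst this
      simp [PySem.Chars.splitOn.go, pvSplit, pvConsHead]
  | succ n ih =>
      cases l with
      | nil => simp [PySem.Chars.splitOn.go, pvSplit, pvConsHead]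
      | cons c rest =>
        by_cases hc : c = '$'
        · subst hc
          have hp : List.isPrefixOf ['$'] ('$' :: rest) = true := by simp [List.isPrefixOf]
          rw [PySem.Chars.splitOn.go]
          simp only [hp, if_true]
          have hdrop : List.drop ['$'].length ('$' :: rest) = rest := rfl
          rw [hdrop, ih rest [] (cur.reverse :: acc) (by simpa using Nat.le_of_succ_le_succ h)]
          have hsp : pvSplit ('$' :: rest) = [] :: pvSplit rest := by simp [pvSplit]
          rw [hsp]
          cases hx : pvSplit rest with
          | nil => exact absurd hx (pvSplit_ne_nil rest)
          | cons a t => simp [pvConsHead]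
        · have hp : List.isPrefixOf ['$'] (c :: rest) = false := by
            simp [List.isPrefixOf, Ne.symm hc]
          rw [PySem.Chars.splitOn.go]
          simp only [hp, Bool.false_eq_true, if_false]
          rw [ih rest (c :: cur) acc (by simpa using Nat.le_of_succ_le_succ h)]
          have hsp : pvSplit (c :: rest) = pvConsHead [c] (pvSplit rest) := by
            simp [pvSplit, hc]
          rw [hsp, List.reverse_cons, ← pvConsHead_assoc]

theorem pvSplitOn_eq (l : List Char) : PySem.Chars.splitOn l ['$'] = pvSplit l := by
  rw [PySem.Chars.splitOn, pvSplitOn_go_eq (l.length + 1) l [] [] (by omega)]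
  cases h : pvSplit l with
  | nil => exact absurd h (pvSplit_ne_nil l)
  | cons a t => simp [pvConsHead]

-- single-character replace is a flatMap
def pvRep (a : Char) (new : List Char) (l : List Char) : List Char :=
  l.flatMap (fun c => if c = a then new else [c])

theorem pvReplace_go_eq (a : Char) (new : List Char) (fuel : Nat) (l acc : List Char)
    (h : l.length ≤ fuel) :
    PySem.Chars.replace.go [a] new fuel l acc = acc.reverse ++ pvRep a new l := by
  induction fuel generalizing l acc with
  | zero =>
      have : l = [] := by cases l <;> simp_all
      subst this
      simp [PySem.Chars.replace.go, pvRep]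
  | succ n ih =>
      cases l with
      | nil => simp [PySem.Chars.replace.go, pvRep]
      | cons c rest =>
        by_cases hc : c = a
        · subst hc
          have hp : List.isPrefixOf [c] (c :: rest) = true := by simp [List.isPrefixOf]
          rw [PySem.Chars.replace.go]
          simp only [hp, if_true]
          have hdrop : List.drop [c].length (c :: rest) = rest := rfl
          rw [hdrop, ih rest (new.reverse ++ acc) (by simpa using Nat.le_of_succ_le_succ h)]
          simp [pvRep]

        · have hp : List.isPrefixOf [a] (c :: rest) = false := by
            simp [List.isPrefixOf, Ne.symm hc]
          rw [PySem.Chars.replace.go]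
          simp only [hp, Bool.false_eq_true, if_false]
          rw [ih rest (c :: acc) (by simpa using Nat.le_of_succ_le_succ h)]
          simp [pvRep, hc]

theorem pvReplace_single (a : Char) (new : List Char) (l : List Char) :
    PySem.Chars.replace l [a] new = pvRep a new l := by
  rw [PySem.Chars.replace]
  simp only [List.isEmpty]
  exact pvReplace_go_eq a new l.length l [] (le_refl _)

-- the per-character escape the composed replaces compute
def pvEsc (c : Char) : List Char :=
  if c = '*' then ['\\', '*'] else if c = '|' then ['\\', '|'] else [c]

theorem pvBChunk_eq (m d : Bool) (chunk : List Char) :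
    pvBChunk m d chunk = if m || d then chunk.flatMap pvEsc else chunk := by
  unfold pvBChunk
  split
  · rw [pvReplace_single, pvReplace_single]
    induction chunk with
    | nil => simp [pvRep]
    | cons c rest ih =>
      simp only [pvRep, List.flatMap_cons] at *
      rw [← ih]
      by_cases h1 : c = '*'
      · subst h1; simp [pvEsc]
      · by_cases h2 : c = '|'
        · subst h2; simp [pvEsc]
        · simp [pvEsc, h1, h2]
  · rfl

theorem pvBChunk_cons (m d : Bool) (c : Char) (h : List Char) :
    pvBChunk m d (c :: h) = (if m || d then pvEsc c else [c]) ++ pvBChunk m d h := by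
  rw [pvBChunk_eq, pvBChunk_eq]
  by_cases hm : (m || d) = true <;> simp [hm]

theorem pvBLoop_consHead (c : Char) (h : List Char) (t : List (List Char)) (m d : Bool) :
    pvBLoop ((c :: h) :: t) m d = (if m || d then pvEsc c else [c]) ++ pvBLoop (h :: t) m d := by
  match t with
  | [] => simp [pvBLoop, pvBChunk_cons]
  | [] :: r :: rest => simp [pvBLoop, pvBChunk_cons]
  | q :: rest =>
      cases rest with
      | nil => simp [pvBLoop, pvBChunk_cons]
      | cons r rest' =>
        cases q with
        | nil => simp [pvBLoop, pvBChunk_cons]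
        | cons x xs => simp [pvBLoop, pvBChunk_cons]

theorem pvBChunk_nil (m d : Bool) : pvBChunk m d [] = [] := by
  rw [pvBChunk_eq]; cases (m || d) <;> simp

-- a lone '$' separator: the next part is nonempty, or it is the final part
theorem pvBLoop_sep (q : List Char) (t : List (List Char)) (m d : Bool)
    (h : q = [] → t = []) :
    pvBLoop ([] :: q :: t) m d = '$' :: pvBLoop (q :: t) (if d then m else !m) d := by
  cases t with
  | nil => cases q <;> simp [pvBLoop, pvBChunk_nil]
  | cons r t' =>
    cases q with
    | nil => simp at h
    | cons x xs => simp [pvBLoop, pvBChunk_nil]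

-- shape of pvSplit of a string not starting with '$'
theorem pvSplit_shape (rest : List Char) (hne : ∀ r, rest = '$' :: r → False) :
    ∃ q t, pvSplit rest = q :: t ∧ (q = [] → t = []) := by
  cases rest with
  | nil => exact ⟨[], [], rfl, fun _ => rfl⟩
  | cons c r' =>
    have hc : c ≠ '$' := fun h => hne r' (by rw [h])
    cases hx : pvSplit r' with
    | nil => exact absurd hx (pvSplit_ne_nil r')
    | cons h t =>
      refine ⟨c :: h, t, ?_, by simp⟩
      simp [pvSplit, hc, hx, pvConsHead]

theorem pvKey (l : List Char) (m d : Bool) :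
    pvBLoop (pvSplit l) m d = pvALoop l m d := by
  fun_induction pvALoop l m d with
  | case1 m d => simp [pvSplit, pvBLoop, pvBChunk_nil]
  | case2 rest m d ih =>
    have h1 : pvSplit ('$' :: '$' :: rest) = [] :: [] :: pvSplit rest := by simp [pvSplit]
    rw [h1]
    cases hx : pvSplit rest with
    | nil => exact absurd hx (pvSplit_ne_nil rest)
    | cons a t =>
      simp only [pvBLoop, pvBChunk_nil]
      rw [← hx, ih]
      simp
  | case3 rest m hne ih =>
    have h1 : pvSplit ('$' :: rest) = [] :: pvSplit rest := by simp [pvSplit]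
    obtain ⟨q, t, hqt, hq⟩ := pvSplit_shape rest hne
    rw [h1, hqt, pvBLoop_sep q t m true hq, ← hqt]
    simp [ih]
  | case4 rest m d hne hd ih =>
    have h1 : pvSplit ('$' :: rest) = [] :: pvSplit rest := by simp [pvSplit]
    obtain ⟨q, t, hqt, hq⟩ := pvSplit_shape rest hne
    rw [h1, hqt, pvBLoop_sep q t m d hq, ← hqt]
    have hd' : d = false := by cases d <;> simp_all
    subst hd'
    simp [ih]
  | case5 c rest m d hne hc hesc ih =>
    have hc' : c ≠ '$' := fun h => hc h
    cases hx : pvSplit rest with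
    | nil => exact absurd hx (pvSplit_ne_nil rest)
    | cons h t =>
      have h1 : pvSplit (c :: rest) = (c :: h) :: t := by
        simp [pvSplit, hc', hx, pvConsHead]
      rw [h1, pvBLoop_consHead, ← hx, ih]
      have hmd : (m || d) = true := by
        cases hb : (m || d) <;> simp_all
      have hstar : c = '*' ∨ c = '|' := by
        have := hesc
        rw [hmd] at this
        simp at this
        rcases this with h' | h'
        · exact Or.inl h'
        · exact Or.inr h'
      rcases hstar with h' | h' <;> subst h' <;> simp [hmd, pvEsc]
  | case6 c rest m d hne hc hesc ih =>
    have hc' : c ≠ '$' := fun h => hc h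
    cases hx : pvSplit rest with
    | nil => exact absurd hx (pvSplit_ne_nil rest)
    | cons h t =>
      have h1 : pvSplit (c :: rest) = (c :: h) :: t := by
        simp [pvSplit, hc', hx, pvConsHead]
      rw [h1, pvBLoop_consHead, ← hx, ih]
      by_cases hmd : (m || d) = true
      · rw [hmd] at hesc
        have h1 : c ≠ '*' := by intro h'; subst h'; simp at hesc
        have h2 : c ≠ '|' := by intro h'; subst h'; simp at hesc
        simp [hmd, pvEsc, h1, h2]
      · have : (m || d) = false := by cases hb : (m || d) <;> simp_all
        simp [this]

-- ===== VERDICT (by name: the statement is the Claim_ definition above) =====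
theorem escape_math_symbols_spec : Claim_equal_escape_math_symbols := by
  intro text _
  unfold Spec_escape_math_symbols escape_math_symbols escape_math_symbols_alt
  rw [pvSplitOn_eq, pvKey]
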